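-- pv_equiv track=rewrite | github.com/sbomify/github-action | sbomify_action/_hash_enrichment/parsers/uv_lock.py | _select_best_wheel_hash
-- ===== SOURCE A (Python) =====
-- def _select_best_wheel_hash(wheels: list) -> str | None:
--     """Select the best wheel hash from available wheels.
--
--     Prefers universal wheels (py3-none-any) over platform-specific ones.
--     """
--     if not wheels:
--         return None
--
--     universal_hash = None
--     first_hash = None
--
--     for wheel in wheels:
--         if not isinstance(wheel, dict):
--             continue
--
--         hash_str = wheel.get("hash")
--         if not hash_str:
--             continue
--
--         # Track first valid hash as fallback
--         if first_hash is None: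
--             first_hash = hash_str
--
--         # Check if this is a universal wheel
--         url = wheel.get("url", "")
--         filename = wheel.get("filename", "") or url.split("/")[-1] if url else ""
--         if "py3-none-any" in filename or "py2.py3-none-any" in filename:
--             universal_hash = hash_str
--             break  # Found universal, stop searching
--
--     return universal_hash or first_hash
-- ===== SOURCE B (Python) =====
-- def _select_best_wheel_hash(wheels: list) -> str | None:
--     """Select the best wheel hash, preferring universal wheels (py3-none-any)."""
--
--     def _has_hash(w):
--         return isinstance(w, dict) and bool(w.get("hash"))
--
--     def _is_universal(w):
--         url = w.get("url", "")
--         # A's exact filename rule (precedence included): '' when url is falsy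
--         filename = (w.get("filename", "") or url.split("/")[-1]) if url else ""
--         return "py3-none-any" in filename  # also matches "py2.py3-none-any"
--
--     universal = next((w["hash"] for w in wheels if _has_hash(w) and _is_universal(w)), None)
--     return universal or next((w["hash"] for w in wheels if _has_hash(w)), None)
-- ===== Notes on version B (the rewrite author's own statement) =====
-- stated objective: simpler
-- what changed: Replaces the stateful loop with break and two accumulator variables by two declarative first-match scans (universal, then fallback) over small predicates, and drops the redundant 'py2.py3-none-any' check (it is a superstring of 'py3-none-any').
import Mathlib
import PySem

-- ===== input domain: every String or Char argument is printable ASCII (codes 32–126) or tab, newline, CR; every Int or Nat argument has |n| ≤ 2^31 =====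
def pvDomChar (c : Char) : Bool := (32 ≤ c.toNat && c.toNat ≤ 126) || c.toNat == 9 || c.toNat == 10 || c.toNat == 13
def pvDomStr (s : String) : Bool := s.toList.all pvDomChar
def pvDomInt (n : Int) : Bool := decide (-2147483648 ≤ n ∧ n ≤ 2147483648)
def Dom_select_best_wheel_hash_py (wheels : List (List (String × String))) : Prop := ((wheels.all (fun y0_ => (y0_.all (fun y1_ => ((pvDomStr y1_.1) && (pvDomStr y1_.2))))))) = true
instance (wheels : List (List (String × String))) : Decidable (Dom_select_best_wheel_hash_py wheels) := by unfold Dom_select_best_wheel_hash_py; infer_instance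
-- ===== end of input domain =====

-- B replaces A's stateful loop (break + two accumulators) by two declarative first-match
-- scans and drops the redundant 'py2.py3-none-any' check; objective: simpler, same cost.

-- Python truthiness of a `str | None` value
def pvTruthy (o : Option String) : Bool := match o with | some s => s ≠ "" | none => false

-- Python `x or y` for `str | None` operands
def pvOr (a b : Option String) : Option String := if pvTruthy a then a else b

-- ===== PORT A =====
-- filename = (wheel.get("filename","") or url.split("/")[-1]) if url else ""
-- (str.split with a separator never returns an empty list, so [-1] is its last element)
def pvFilenameA (w : List (String × String)) : String :=
  let url := PySem.Dict.getD (PySem.Dict.mk w) "url" ""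
  if url ≠ "" then
    let f := PySem.Dict.getD (PySem.Dict.mk w) "filename" ""
    if f ≠ "" then f else ((PySem.Str.split? url "/").getD []).getLastD ""
  else ""

-- the for-loop: state = (universal_hash, first_hash); returns at the break point
def pvLoopA : List (List (String × String)) → Option String → Option String × Option String
  | [], first => (none, first)
  | w :: ws, first =>
    -- isinstance(wheel, dict) is always true on this input type
    let hs := PySem.Dict.get? (PySem.Dict.mk w) "hash"
    if pvTruthy hs then
      let first' := if first = none then hs else first
      let fn := pvFilenameA w
      if PySem.Str.isIn "py3-none-any" fn || PySem.Str.isIn "py2.py3-none-any" fn then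
        (hs, first')  -- break
      else pvLoopA ws first'
    else pvLoopA ws first

def select_best_wheel_hash_py (wheels : List (List (String × String))) : Option String :=
  if wheels = [] then none
  else
    let r := pvLoopA wheels none
    pvOr r.1 r.2

-- ===== PORT B =====
def pvHasHash (w : List (String × String)) : Bool :=
  pvTruthy (PySem.Dict.get? (PySem.Dict.mk w) "hash")

def pvIsUniversal (w : List (String × String)) : Bool :=
  let url := PySem.Dict.getD (PySem.Dict.mk w) "url" ""
  let filename :=
    if url ≠ "" then
      let f := PySem.Dict.getD (PySem.Dict.mk w) "filename" ""
      if f ≠ "" then f else ((PySem.Str.split? url "/").getD []).getLastD ""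
    else ""
  PySem.Str.isIn "py3-none-any" filename

def select_best_wheel_hash_py_alt (wheels : List (List (String × String))) : Option String :=
  let universal :=
    (wheels.find? (fun w => pvHasHash w && pvIsUniversal w)).bind
      (fun w => PySem.Dict.get? (PySem.Dict.mk w) "hash")
  pvOr universal
    ((wheels.find? pvHasHash).bind (fun w => PySem.Dict.get? (PySem.Dict.mk w) "hash"))

-- ===== PRECONDITION & SPEC =====
def Spec_select_best_wheel_hash_py (wheels : List (List (String × String))) (out : Option String) : Prop := out = select_best_wheel_hash_py_alt wheels
instance (wheels : List (List (String × String))) (out : Option String) : Decidable (Spec_select_best_wheel_hash_py wheels out) := by unfold Spec_select_best_wheel_hash_py; infer_instance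

-- ===== CLAIM (what is proved, stated in full; the proofs are below) =====
def Claim_equal_select_best_wheel_hash_py : Prop := ∀ (wheels : List (List (String × String))), Dom_select_best_wheel_hash_py wheels → Spec_select_best_wheel_hash_py wheels (select_best_wheel_hash_py wheels)

-- ===== LEMMAS AND PROOFS =====

theorem pvOr_none_left (b : Option String) : pvOr none b = b := rfl

theorem pvOr_truthy (a b : Option String) (h : pvTruthy a = true) : pvOr a b = a := by
  simp [pvOr, h]

-- "py2.py3-none-any" contains "py3-none-any", so A's second check is redundant
theorem pv_uni_redundant (f : String) :
    (PySem.Str.isIn "py3-none-any" f || PySem.Str.isIn "py2.py3-none-any" f)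
      = PySem.Str.isIn "py3-none-any" f := by
  cases h1 : PySem.Str.isIn "py3-none-any" f
  · cases h2 : PySem.Str.isIn "py2.py3-none-any" f
    · simp
    · exfalso
      have hsub : ("py3-none-any".toList <:+: "py2.py3-none-any".toList) := by decide
      have h3 : ("py3-none-any".toList <:+: f.toList) :=
        hsub.trans ((PySem.Str.isIn_iff_infix _ _).mp h2)
      have h4 := (PySem.Str.isIn_iff_infix "py3-none-any" f).mpr h3
      rw [h1] at h4
      exact Bool.false_ne_true h4
  · simp

theorem pv_isUniversal_eq (w : List (String × String)) :
    (PySem.Str.isIn "py3-none-any" (pvFilenameA w)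
      || PySem.Str.isIn "py2.py3-none-any" (pvFilenameA w)) = pvIsUniversal w := by
  rw [pv_uni_redundant]; rfl

theorem pv_loop_eq (ws : List (List (String × String))) (first : Option String)
    (hf : first = none ∨ pvTruthy first = true) :
    pvOr (pvLoopA ws first).1 (pvLoopA ws first).2
      = pvOr ((ws.find? (fun w => pvHasHash w && pvIsUniversal w)).bind
                (fun w => PySem.Dict.get? (PySem.Dict.mk w) "hash"))
             (pvOr first ((ws.find? pvHasHash).bind
                (fun w => PySem.Dict.get? (PySem.Dict.mk w) "hash"))) := by
  induction ws generalizing first with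
  | nil =>
    rcases hf with h | h
    · simp [pvLoopA, pvOr, h, pvTruthy]
    · simp [pvLoopA, pvOr, h]
  | cons w ws ih =>
    have hcond := pv_isUniversal_eq w
    by_cases hu : pvHasHash w = true
    · have hu' : pvTruthy (PySem.Dict.get? (PySem.Dict.mk w) "hash") = true := hu
      by_cases hv : pvIsUniversal w = true
      · -- break: first wheel with a hash is universal
        rw [List.find?_cons_of_pos (by simp [hu, hv]),
            List.find?_cons_of_pos hu]
        simp only [pvLoopA, hu', if_true]
        rw [hcond, hv]
        simp [pvOr, hu']
      · have hv' : pvIsUniversal w = false := by simpa using hv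
        rw [List.find?_cons_of_neg (by simp [hv']),
            List.find?_cons_of_pos hu]
        simp only [pvLoopA, hu', if_true]
        rw [hcond, hv']
        simp only [Bool.false_eq_true, if_false]
        set first' := if first = none then PySem.Dict.get? (PySem.Dict.mk w) "hash" else first
          with hfirst'
        have hf' : first' = none ∨ pvTruthy first' = true := by
          rcases hf with h | h
          · right; rw [hfirst', if_pos h]; exact hu'
          · right; rw [hfirst']; split
            · exact hu'
            · exact h
        rw [ih first' hf']
        congr 1
        rcases hf with h | h
        · rw [hfirst', if_pos h, h, pvOr_none_left, pvOr_truthy _ _ hu', Option.bind_some]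
        · rcases first with _ | s
          · simp [pvTruthy] at h
          · rw [hfirst', if_neg (by simp), pvOr_truthy _ _ h, pvOr_truthy _ _ h]
    · have hu' : pvTruthy (PySem.Dict.get? (PySem.Dict.mk w) "hash") = false := by
        simpa using hu
      rw [List.find?_cons_of_neg (by simp [hu]),
          List.find?_cons_of_neg (by simp [hu])]
      simp only [pvLoopA, hu', Bool.false_eq_true, if_false]
      exact ih first hf

-- ===== VERDICT (by name: the statement is the Claim_ definition above) =====
theorem select_best_wheel_hash_py_spec : Claim_equal_select_best_wheel_hash_py := by
  intro wheels _
  unfold Spec_select_best_wheel_hash_py select_best_wheel_hash_py select_best_wheel_hash_py_alt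
  by_cases h : wheels = []
  · subst h; simp [pvOr, pvTruthy]
  · rw [if_neg h]
    exact pv_loop_eq wheels none (Or.inl rfl)
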